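-- pv_equiv track=rewrite | github.com/ahsanmalik7/hl7Parser | hl7ConversionFunctions.py | count_OBX_per_OBR
-- ===== SOURCE A (Python) =====
-- def count_OBX_per_OBR(hl7List):
--     # Initialize a dictionary to store the counts
--     obx_counts = {}
--
--     current_obr = None  # Keep track of the current OBR segment
--     current_obx_count = 0  # Initialize the OBX count for the current OBR
--
--     for line in hl7List:
--         segments = line
--
--         if segments[:3] == "OBR":
--
--             if current_obr is not None:
--                 obx_counts[current_obr] = current_obx_count
--
--             current_obr = line
--             current_obx_count = 0
--         elif segments[:3] == "OBX":
--             current_obx_count += 1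
--
--     # Store the OBX count for the last OBR segment
--     if current_obr is not None:
--         obx_counts[current_obr] = current_obx_count
--
--     return obx_counts
-- ===== SOURCE B (Python) =====
-- def count_OBX_per_OBR(hl7List):
--     # Two-phase: segment the message at OBR lines (consuming one iterator in chunks),
--     # collect an ordered (obr, obx-count) pair list, then build the dict from the pairs.
--     pairs = []
--     it = iter(hl7List)
--     pending = next(it, None)
--     while pending is not None:
--         line = pending
--         pending = next(it, None)
--         if line[:3] == "OBR":
--             cnt = 0
--             while pending is not None and pending[:3] != "OBR":
--                 if pending[:3] == "OBX":
--                     cnt += 1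
--                 pending = next(it, None)
--             pairs.append((line, cnt))
--     d = {}
--     for k, v in pairs:
--         d[k] = v
--     return d
-- ===== Notes on version B (the rewrite author's own statement) =====
-- stated objective: alternative
-- what changed: Replaces A's single-pass running accumulator (current OBR + running OBX count with a final flush) by a two-phase segmentation: consume the list in OBR-headed chunks counting OBX per chunk into an ordered pair list, then build the dict from the pairs.
import Mathlib
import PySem

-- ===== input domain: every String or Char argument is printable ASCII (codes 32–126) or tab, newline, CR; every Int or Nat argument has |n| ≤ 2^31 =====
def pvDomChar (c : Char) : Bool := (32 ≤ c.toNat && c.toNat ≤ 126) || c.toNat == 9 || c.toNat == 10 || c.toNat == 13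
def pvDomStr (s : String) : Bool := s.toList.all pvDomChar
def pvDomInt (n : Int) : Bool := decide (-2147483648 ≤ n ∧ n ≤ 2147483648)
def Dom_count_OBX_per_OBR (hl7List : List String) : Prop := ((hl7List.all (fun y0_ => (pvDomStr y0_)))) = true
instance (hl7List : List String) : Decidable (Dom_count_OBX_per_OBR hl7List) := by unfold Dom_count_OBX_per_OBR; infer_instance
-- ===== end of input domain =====

-- B replaces A's running-accumulator pass with a two-phase segmentation (OBR-headed chunks → ordered pair list → dict); alternative decomposition, same results.


-- ===== PORT A =====
-- line[:3], shared by both Pythons' tests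
def pvPrefix3 (s : String) : String := PySem.Str.slice s none (some 3)

-- the body of A's for-loop, on state (obx_counts, current_obr, current_obx_count)
def pvStepA (st : PySem.Dict String Int × Option String × Int) (line : String) :
    PySem.Dict String Int × Option String × Int :=
  if pvPrefix3 line == "OBR" then
    match st.2.1 with
    | some o => (st.1.insert o st.2.2, some line, 0)
    | none   => (st.1, some line, 0)
  else if pvPrefix3 line == "OBX" then (st.1, st.2.1, st.2.2 + 1)
  else st

-- the final 'if current_obr is not None: obx_counts[current_obr] = current_obx_count'
def pvFinishA (st : PySem.Dict String Int × Option String × Int) : PySem.Dict String Int :=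
  match st.2.1 with
  | some o => st.1.insert o st.2.2
  | none   => st.1

def count_OBX_per_OBR (hl7List : List String) : List (String × Int) :=
  (pvFinishA (hl7List.foldl pvStepA (PySem.Dict.empty, none, 0))).items

-- ===== PORT B =====
-- B's inner while loop: consume lines until the next OBR (left unconsumed), counting OBX;
-- returns (cnt, remaining lines starting at the next OBR if any)
def pvChunkB : List String → Int × List String
  | [] => (0, [])
  | l :: ls =>
    if pvPrefix3 l == "OBR" then (0, l :: ls)
    else
      let r := pvChunkB ls
      ((if pvPrefix3 l == "OBX" then 1 else 0) + r.1, r.2)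

-- termination measure for the outer loop (cited by pvPairsB's decreasing_by)
lemma pvChunkB_rest_le (ls : List String) : (pvChunkB ls).2.length ≤ ls.length := by
  induction ls with
  | nil => simp [pvChunkB]
  | cons l ls ih =>
    by_cases h : (pvPrefix3 l == "OBR") = true <;> simp [pvChunkB, h] <;> omega

-- B's outer while loop over the iterator: collect the ordered (obr, count) pair list
def pvPairsB : List String → List (String × Int)
  | [] => []
  | line :: tail =>
    if pvPrefix3 line == "OBR" then
      (line, (pvChunkB tail).1) :: pvPairsB (pvChunkB tail).2
    else pvPairsB tail
termination_by xs => xs.length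
decreasing_by
  · exact Nat.lt_succ_of_le (pvChunkB_rest_le tail)
  · simp

-- 'd = {}; for k, v in pairs: d[k] = v'
def pvDictOf (pairs : List (String × Int)) : PySem.Dict String Int :=
  pairs.foldl (fun d p => d.insert p.1 p.2) PySem.Dict.empty

def count_OBX_per_OBR_alt (hl7List : List String) : List (String × Int) :=
  (pvDictOf (pvPairsB hl7List)).items

-- ===== PRECONDITION & SPEC =====
def Spec_count_OBX_per_OBR (hl7List : List String) (out : List (String × Int)) : Prop := out = count_OBX_per_OBR_alt hl7List
instance (hl7List : List String) (out : List (String × Int)) : Decidable (Spec_count_OBX_per_OBR hl7List out) := by unfold Spec_count_OBX_per_OBR; infer_instance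

-- ===== CLAIM (what is proved, stated in full; the proofs are below) =====
def Claim_equal_count_OBX_per_OBR : Prop := ∀ (hl7List : List String), Dom_count_OBX_per_OBR hl7List → Spec_count_OBX_per_OBR hl7List (count_OBX_per_OBR hl7List)

-- ===== LEMMAS AND PROOFS =====
-- the OBX count of a chunk, as a filter length, for stating the invariant
def pvCountOBX (seg : List String) : Int :=
  ((seg.filter (fun l => pvPrefix3 l == "OBX")).length : Int)

-- the chunk consumed by B's inner loop is exactly takeWhile/dropWhile at the next OBR
lemma pvChunkB_eq (ls : List String) :
    pvChunkB ls = (pvCountOBX (ls.takeWhile (fun l => !(pvPrefix3 l == "OBR"))),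
                   ls.dropWhile (fun l => !(pvPrefix3 l == "OBR"))) := by
  induction ls with
  | nil => simp [pvChunkB, pvCountOBX]
  | cons l ls ih =>
    by_cases h : (pvPrefix3 l == "OBR") = true <;>
      by_cases hX : (pvPrefix3 l == "OBX") = true <;>
        simp [pvChunkB, h, hX, ih, pvCountOBX, List.filter_cons] <;> omega

lemma pvPairsB_cons_obr (x : String) (xs : List String) (h : (pvPrefix3 x == "OBR") = true) :
    pvPairsB (x :: xs) =
      (x, pvCountOBX (xs.takeWhile (fun l => !(pvPrefix3 l == "OBR")))) ::
        pvPairsB (xs.dropWhile (fun l => !(pvPrefix3 l == "OBR"))) := by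
  rw [pvPairsB]; simp [h, pvChunkB_eq]

lemma pvPairsB_cons_other (x : String) (xs : List String) (h : ¬ (pvPrefix3 x == "OBR") = true) :
    pvPairsB (x :: xs) = pvPairsB xs := by
  rw [pvPairsB]; simp [h]

-- A's loop from a state with a current OBR o and running count c, followed by the flush,
-- equals inserting (o, c + count of OBX up to the next OBR) then B's pairs of the rest.
lemma pv_someCase (xs : List String) (d : PySem.Dict String Int) (o : String) (c : Int) :
    pvFinishA (xs.foldl pvStepA (d, some o, c)) =
      ((o, c + pvCountOBX (xs.takeWhile (fun l => !(pvPrefix3 l == "OBR")))) ::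
        pvPairsB (xs.dropWhile (fun l => !(pvPrefix3 l == "OBR")))).foldl
        (fun d p => d.insert p.1 p.2) d := by
  induction xs generalizing d o c with
  | nil => simp [pvFinishA, pvCountOBX, pvPairsB]
  | cons x xs ih =>
    by_cases hR : (pvPrefix3 x == "OBR") = true
    · have hs : pvStepA (d, some o, c) x = (d.insert o c, some x, 0) := by
        simp [pvStepA, hR]
      rw [List.foldl_cons, hs, ih]
      simp [hR, pvPairsB_cons_obr x xs hR, pvCountOBX]
    · by_cases hX : (pvPrefix3 x == "OBX") = true
      · have hs : pvStepA (d, some o, c) x = (d, some o, c + 1) := by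
          simp [pvStepA, hR, hX]
        rw [List.foldl_cons, hs, ih]
        simp [hR, hX, pvCountOBX]
        ring_nf
      · have hs : pvStepA (d, some o, c) x = (d, some o, c) := by
          simp [pvStepA, hR, hX]
        rw [List.foldl_cons, hs, ih]
        simp [hR, hX, pvCountOBX]

-- A's loop from the initial no-current-OBR state (any running count), followed by the flush,
-- builds exactly the dict B builds from its pair list.
lemma pv_noneCase (xs : List String) (d : PySem.Dict String Int) (c : Int) :
    pvFinishA (xs.foldl pvStepA (d, none, c)) =
      (pvPairsB xs).foldl (fun d p => d.insert p.1 p.2) d := by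
  induction xs generalizing d c with
  | nil => simp [pvFinishA, pvPairsB]
  | cons x xs ih =>
    by_cases hR : (pvPrefix3 x == "OBR") = true
    · have hs : pvStepA (d, none, c) x = (d, some x, 0) := by
        simp [pvStepA, hR]
      rw [List.foldl_cons, hs, pv_someCase, pvPairsB_cons_obr x xs hR]
      simp
    · by_cases hX : (pvPrefix3 x == "OBX") = true
      · have hs : pvStepA (d, none, c) x = (d, none, c + 1) := by
          simp [pvStepA, hR, hX]
        rw [List.foldl_cons, hs, ih, pvPairsB_cons_other x xs hR]
      · have hs : pvStepA (d, none, c) x = (d, none, c) := by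
          simp [pvStepA, hR, hX]
        rw [List.foldl_cons, hs, ih, pvPairsB_cons_other x xs hR]

-- ===== VERDICT (by name: the statement is the Claim_ definition above) =====
theorem count_OBX_per_OBR_spec : Claim_equal_count_OBX_per_OBR := by
  intro hl7List _
  unfold Spec_count_OBX_per_OBR count_OBX_per_OBR count_OBX_per_OBR_alt pvDictOf
  rw [pv_noneCase]
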